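-- pv_equiv track=rewrite | github.com/Vectorredz/Folder | Prev/sliding_window.py | grid_transforms
-- ===== SOURCE A (Python) =====
-- def grid_transforms(T, inst):
--     output = []
--     cols = len(T[0])
--     rows  = len(T)
--     for i in range(len(inst)):
--         if inst[i] == 'CW':
--             grid_cw = [[0]*rows for _ in range(cols)]
--             for c in range(cols):
--                 for r in range(rows-1,-1,-1):
--                     grid_cw[c][rows-r-1] = T[r][c]
--             output.append(grid_cw)
--
--         elif inst[i] == 'CCW':
--             grid_ccw = [[0]*rows for _ in range(cols)]
--             for c in range(cols-1,-1,-1):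
--                 for r in range(rows):
--                     grid_ccw[cols-c-1][r] = T[r][c]
--             output.append(grid_ccw)
--         elif inst[i] == 'FLIP_V':
--             grid_v = [[0]*cols for _ in range(rows)]
--
--             output.append(grid_v)
--     return output
-- ===== SOURCE B (Python) =====
-- def grid_transforms(T, inst):
--     rows = len(T)
--     cols = len(T[0])
--     output = []
--     for op in inst:
--         if op == 'CW':
--             output.append([list(r) for r in zip(*T[::-1])])
--         elif op == 'CCW':
--             output.append([list(r) for r in zip(*T)][::-1])
--         elif op == 'FLIP_V':
--             output.append([[0] * cols for _ in range(rows)])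
--     return output
-- ===== Notes on version B (the rewrite author's own statement) =====
-- stated objective: idiomatic
-- what changed: B builds each rotated grid in one shot as a whole-row transpose (zip of rows) combined with a reversal, instead of A's preallocated zero grid filled cell by cell via destination-index arithmetic in nested countdown loops.
import Mathlib
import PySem

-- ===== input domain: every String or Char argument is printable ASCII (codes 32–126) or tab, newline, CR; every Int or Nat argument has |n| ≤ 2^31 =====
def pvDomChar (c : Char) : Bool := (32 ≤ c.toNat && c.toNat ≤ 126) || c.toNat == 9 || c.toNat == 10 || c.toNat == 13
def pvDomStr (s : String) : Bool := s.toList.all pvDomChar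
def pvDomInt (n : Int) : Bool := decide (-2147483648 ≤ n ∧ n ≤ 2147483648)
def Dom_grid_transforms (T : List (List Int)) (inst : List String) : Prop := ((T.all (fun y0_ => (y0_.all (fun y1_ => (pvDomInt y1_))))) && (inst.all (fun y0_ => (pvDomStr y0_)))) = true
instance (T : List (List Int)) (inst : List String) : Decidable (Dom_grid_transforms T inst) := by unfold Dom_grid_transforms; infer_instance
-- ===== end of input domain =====

-- B replaces A's per-cell destination-index assignments into a preallocated grid by
-- whole-row transpose/reverse (zip-based) construction of the rotated grids; same cost,
-- more idiomatic. Return values only; neither version mutates its arguments.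

-- ===== PORT A =====
-- grid[c][j] = v  (grid_cw[c][rows-r-1] = T[r][c] etc.)
def pvSetCell (g : List (List Int)) (i j : Int) (v : Int) : List (List Int) :=
  PySem.List.pySetD g i (PySem.List.pySetD (PySem.List.pyGetD g i []) j v)

def grid_transforms (T : List (List Int)) (inst : List String) : List (List (List Int)) :=
  let cols : Int := (PySem.List.pyGetD T 0 []).length
  let rows : Int := PySem.List.len T
  (PySem.List.pyRange 0 (PySem.List.len inst) 1).foldl (fun output i =>
    let ins := PySem.List.pyGetD inst i ""
    if ins = "CW" then
      let grid0 := (PySem.List.pyRange 0 cols 1).map (fun _ => List.replicate rows.toNat (0:Int))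
      let grid_cw := (PySem.List.pyRange 0 cols 1).foldl (fun g c =>
        (PySem.List.pyRange (rows-1) (-1) (-1)).foldl (fun g r =>
          pvSetCell g c (rows - r - 1) (PySem.List.pyGetD (PySem.List.pyGetD T r []) c 0)) g) grid0
      output ++ [grid_cw]
    else if ins = "CCW" then
      let grid0 := (PySem.List.pyRange 0 cols 1).map (fun _ => List.replicate rows.toNat (0:Int))
      let grid_ccw := (PySem.List.pyRange (cols-1) (-1) (-1)).foldl (fun g c =>
        (PySem.List.pyRange 0 rows 1).foldl (fun g r =>
          pvSetCell g (cols - c - 1) r (PySem.List.pyGetD (PySem.List.pyGetD T r []) c 0)) g) grid0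
      output ++ [grid_ccw]
    else if ins = "FLIP_V" then
      output ++ [(PySem.List.pyRange 0 rows 1).map (fun _ => List.replicate cols.toNat (0:Int))]
    else output) []

-- ===== PORT B =====
-- zip(*ts): truncate at the shortest list, i-th output row = i-th element of each list
def pvZipStar : List (List Int) → List (List Int)
  | [] => []
  | t :: ts =>
    if t.isEmpty || ts.any (·.isEmpty) then []
    else (t.headD 0 :: ts.map (fun l => l.headD 0)) :: pvZipStar (t.tail :: ts.map (fun l => l.tail))
termination_by l => (l.headD []).length
decreasing_by
  simp_all [List.isEmpty_iff]
  cases t with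
  | nil => simp_all
  | cons a t' => simp

def grid_transforms_alt (T : List (List Int)) (inst : List String) : List (List (List Int)) :=
  let rows := T.length
  let cols := (PySem.List.pyGetD T 0 []).length
  inst.foldl (fun output op =>
    if op = "CW" then output ++ [pvZipStar T.reverse]
    else if op = "CCW" then output ++ [(pvZipStar T).reverse]
    else if op = "FLIP_V" then output ++ [List.replicate rows (List.replicate cols (0:Int))]
    else output) []

-- ===== PRECONDITION & SPEC =====
-- Pre_ excludes exactly the inputs where Python A raises IndexError: empty T (len(T[0]))
-- and, when a 'CW'/'CCW' instruction occurs, grids with a row shorter than the first row.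
def Pre_grid_transforms (T : List (List Int)) (inst : List String) : Prop :=
  T ≠ [] ∧ (("CW" ∈ inst ∨ "CCW" ∈ inst) → ∀ row ∈ T, (T.headD []).length ≤ row.length)
instance (T : List (List Int)) (inst : List String) : Decidable (Pre_grid_transforms T inst) := by
  unfold Pre_grid_transforms; infer_instance

def pvWitness_grid_transforms : List (List Int) × List String :=
  ([[1, 2], [3, 4]], ["CW", "CCW", "FLIP_V", "flip"])

def Spec_grid_transforms (T : List (List Int)) (inst : List String) (out : List (List (List Int))) : Prop := out = grid_transforms_alt T inst
instance (T : List (List Int)) (inst : List String) (out : List (List (List Int))) : Decidable (Spec_grid_transforms T inst out) := by unfold Spec_grid_transforms; infer_instance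

-- ===== CLAIM (what is proved, stated in full; the proofs are below) =====
def Claim_equal_grid_transforms : Prop := ∀ (T : List (List Int)) (inst : List String), Dom_grid_transforms T inst → Pre_grid_transforms T inst → Spec_grid_transforms T inst (grid_transforms T inst)

-- ===== LEMMAS AND PROOFS =====

theorem pv_headD_eq_getD {α : Type} (l : List α) (d : α) : l.headD d = l.getD 0 d := by
  cases l <;> rfl

theorem pv_tail_getD {α : Type} (l : List α) (i : Nat) (d : α) :
    l.tail.getD i d = l.getD (i + 1) d := by
  cases l <;> simp [List.getD]

-- writing cells 0,…,n-1 of a list in order, each from the current cell's old value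
theorem pv_foldl_set_range {α : Type} (d : α) (f : Nat → α → α) (step : List α → Nat → List α)
    (hstep : ∀ (w : List α) (k : Nat), k < w.length → step w k = w.set k (f k (w.getD k d))) :
    ∀ (n : Nat) (v : List α), n ≤ v.length →
      (List.range n).foldl step v
        = (List.range n).map (fun k => f k (v.getD k d)) ++ v.drop n := by
  intro n
  induction n with
  | zero => simp
  | succ n ih =>
    intro v hn
    have hn' : n < v.length := by omega
    rw [List.range_succ, List.foldl_append, ih v (by omega), List.foldl_cons, List.foldl_nil]
    have hlen : (List.map (fun k => f k (v.getD k d)) (List.range n)).length = n := by simp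
    rw [hstep _ n (by simp; omega)]
    rw [List.getD_append_right _ _ d n (le_of_eq hlen), hlen, Nat.sub_self]
    have hd0 : (v.drop n).getD 0 d = v.getD n d := by
      rw [List.getD_eq_getElem _ _ (by simp; omega), List.getD_eq_getElem _ _ hn']
      simp [List.getElem_drop]
    rw [hd0, List.set_append_right n _ (le_of_eq hlen), hlen, Nat.sub_self,
      List.drop_eq_getElem_cons hn', List.set_cons_zero, List.map_append]
    simp

-- the nested assignment loop touches only row i of the grid
theorem pv_foldl_setCell {ι : Type} (i : Nat) (jf : ι → Int) (vf : ι → Int) :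
    ∀ (L : List ι) (g : List (List Int)), i < g.length →
      L.foldl (fun g r => pvSetCell g (i : Int) (jf r) (vf r)) g
        = g.set i (L.foldl (fun row r => PySem.List.pySetD row (jf r) (vf r)) (g.getD i [])) := by
  intro L
  induction L with
  | nil =>
    intro g hg
    simp only [List.foldl_nil]
    rw [List.getD_eq_getElem g [] hg, List.set_getElem_self hg]
  | cons r L ih =>
    intro g hg
    simp only [List.foldl_cons]
    have h1 : pvSetCell g (i : Int) (jf r) (vf r)
        = g.set i (PySem.List.pySetD (g.getD i []) (jf r) (vf r)) := by
      simp [pvSetCell, PySem.List.pySetD_natCast, PySem.List.pyGetD_natCast]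
    rw [h1, ih _ (by simpa using hg)]
    have h2 : (g.set i (PySem.List.pySetD (g.getD i []) (jf r) (vf r))).getD i []
        = PySem.List.pySetD (g.getD i []) (jf r) (vf r) := by
      rw [List.getD_eq_getElem _ _ (by simpa using hg)]
      exact List.getElem_set_self (by simpa using hg)
    rw [h2, List.set_set]

-- characterisation of pvZipStar when every list has length ≥ m and some list has length m
theorem pv_zipStar_eq : ∀ (m : Nat) (ts : List (List Int)), ts ≠ [] →
    (∀ l ∈ ts, m ≤ l.length) → (∃ l ∈ ts, l.length = m) →
    pvZipStar ts = (List.range m).map (fun i => ts.map (fun t => t.getD i 0)) := by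
  intro m
  induction m with
  | zero =>
    intro ts hne _ hex
    obtain ⟨l, hl, hlen⟩ := hex
    cases ts with
    | nil => simp at hne
    | cons t ts' =>
      rw [pvZipStar]
      have hc : (t.isEmpty || ts'.any (·.isEmpty)) = true := by
        simp only [Bool.or_eq_true, List.any_eq_true, List.isEmpty_iff]
        rcases List.mem_cons.mp hl with h | h
        · left; exact h ▸ List.length_eq_zero_iff.mp hlen
        · right; exact ⟨l, h, List.length_eq_zero_iff.mp hlen⟩
      simp [hc]
  | succ m ih =>
    intro ts hne hall hex
    cases ts with
    | nil => simp at hne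
    | cons t ts' =>
      rw [pvZipStar]
      have hcond : (t.isEmpty || ts'.any (·.isEmpty)) = false := by
        simp only [Bool.or_eq_false_iff, List.any_eq_false]
        constructor
        · have := hall t (by simp)
          cases t with
          | nil => simp at this
          | cons a t' => simp
        · intro l hl
          have := hall l (by simp [hl])
          cases l with
          | nil => simp at this
          | cons a l' => simp
      rw [if_neg (by simp [hcond])]
      have hrec := ih (t.tail :: ts'.map (fun l => l.tail)) (by simp)
        (by
          intro l hl
          rcases List.mem_cons.mp hl with h | h
          · subst h; have := hall t (by simp); simp [List.length_tail]; omega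
          · obtain ⟨l', hl', h⟩ := List.mem_map.mp h
            subst h; have := hall l' (by simp [hl']); simp [List.length_tail]; omega)
        (by
          obtain ⟨l, hl, hlen⟩ := hex
          rcases List.mem_cons.mp hl with h | h
          · refine ⟨t.tail, by simp, ?_⟩
            have ht : t.length = m + 1 := h ▸ hlen
            simp [List.length_tail, ht]
          · refine ⟨l.tail, List.mem_cons.mpr (Or.inr (List.mem_map_of_mem h)), ?_⟩
            simp [List.length_tail, hlen])
      rw [hrec, List.range_succ_eq_map]
      simp only [List.map_cons, List.map_map]
      congr 1
      · simp [List.head?_eq_getElem?]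
      · apply List.map_congr_left
        intro i _
        simp only [Function.comp_apply]
        congr 1
        · exact pv_tail_getD t i 0
        · apply List.map_congr_left
          intro l _
          simp only [Function.comp_apply]
          exact pv_tail_getD l i 0

-- reversed column extraction as a range map (A's CW inner values)
theorem pv_rev_col (T : List (List Int)) (i : Nat) :
    T.reverse.map (fun t => t.getD i 0)
      = (List.range T.length).map
          (fun (j : Nat) => PySem.List.pyGetD (PySem.List.pyGetD T ((T.length : Int) - 1 - (j : Int)) []) (i : Int) 0) := by
  apply List.ext_getElem (by simp)
  intro j h1 h2
  rw [List.getElem_map, List.getElem_map, List.getElem_range, List.getElem_reverse]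
  have hj : j < T.length := by simpa using h1
  have hcast : (T.length : Int) - 1 - (j : Int) = ((T.length - 1 - j : Nat) : Int) := by omega
  rw [hcast, PySem.List.pyGetD_natCast, PySem.List.pyGetD_natCast,
    List.getD_eq_getElem T [] (by omega)]

-- a map over a list as a map over its index range
theorem pv_map_eq_range (T : List (List Int)) (i : Int) :
    T.map (fun t => PySem.List.pyGetD t i 0)
      = (List.range T.length).map (fun (r : Nat) => PySem.List.pyGetD (PySem.List.pyGetD T (r : Int) []) i 0) := by
  apply List.ext_getElem (by simp)
  intro r h1 h2
  rw [List.getElem_map, List.getElem_map, List.getElem_range, PySem.List.pyGetD_natCast,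
    List.getD_eq_getElem T [] (by simpa using h1)]

theorem pv_reverse_map_range {α : Type} (n : Nat) (f : Nat → α) :
    ((List.range n).map f).reverse = (List.range n).map (fun k => f (n - 1 - k)) := by
  apply List.ext_getElem (by simp)
  intro k h1 h2
  rw [List.getElem_reverse, List.getElem_map, List.getElem_map, List.getElem_range,
    List.getElem_range]
  congr 1
  simp

theorem pv_map_const_range {α : Type} (n : Nat) (a : α) :
    (List.range n).map (fun _ => a) = List.replicate n a := by
  induction n with
  | zero => simp
  | succ n ih => rw [List.range_succ, List.map_append, ih, List.replicate_succ']; simp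

-- index arithmetic rewrites used under the fold binders
theorem pv_idx_cw (n j : Nat) : (n : Int) - ((n : Int) - 1 - (j : Int)) - 1 = (j : Int) := by ring
theorem pv_idx_ccw (m k : Nat) : (m : Int) - ((m : Int) - 1 - (k : Int)) - 1 = (k : Int) := by ring

-- the inner row-writing loop fills the whole row
theorem pv_row_fill (n : Nat) (val : Nat → Int) (v : List Int) (hv : v.length = n) :
    (List.range n).foldl (fun (row : List Int) (j : Nat) => PySem.List.pySetD row (j : Int) (val j)) v
      = (List.range n).map val := by
  have := pv_foldl_set_range (0 : Int) (fun k _ => val k)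
    (fun (row : List Int) (j : Nat) => PySem.List.pySetD row (j : Int) (val j))
    (by intro w k _; simp [PySem.List.pySetD_natCast]) n v (by omega)
  rw [this, List.drop_eq_nil_of_le (le_of_eq hv), List.append_nil]

-- A's CW grid construction equals the range-map characterisation
theorem pv_cw_grid (T : List (List Int)) (m : Nat) :
    ((List.range m).map (fun (k : Nat) => (k : Int))).foldl (fun g c =>
        (PySem.List.pyRange ((T.length : Int) - 1) (-1) (-1)).foldl (fun g r =>
          pvSetCell g c ((T.length : Int) - r - 1)
            (PySem.List.pyGetD (PySem.List.pyGetD T r []) c 0)) g)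
      (((List.range m).map (fun (k : Nat) => (k : Int))).map (fun _ => List.replicate (T.length : Int).toNat (0:Int)))
    = (List.range m).map (fun (c : Nat) => (List.range T.length).map
        (fun (j : Nat) => PySem.List.pyGetD (PySem.List.pyGetD T ((T.length : Int) - 1 - (j : Int)) []) (c : Int) 0)) := by
  set n := T.length with hn
  have hrange : PySem.List.pyRange ((n : Int) - 1) (-1) (-1)
      = (List.range n).map (fun (j : Nat) => (n : Int) - 1 - (j : Int)) := by
    have hnn : ((n : Int) - 1 - (-1)).toNat = n := by omega
    rw [PySem.List.pyRange_neg_one, hnn]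
  rw [hrange, List.foldl_map, List.map_map]
  try simp only [Function.comp_def]
  have hstep : ∀ (w : List (List Int)) (k : Nat), k < w.length →
      (((List.range n).map (fun (j : Nat) => (n : Int) - 1 - (j : Int))).foldl (fun g r =>
          pvSetCell g (k : Int) ((n : Int) - r - 1)
            (PySem.List.pyGetD (PySem.List.pyGetD T r []) (k : Int) 0)) w)
      = w.set k ((List.range n).foldl (fun (row : List Int) (j : Nat) =>
          PySem.List.pySetD row ((n : Int) - ((n : Int) - 1 - (j : Int)) - 1)
            (PySem.List.pyGetD (PySem.List.pyGetD T ((n : Int) - 1 - (j : Int)) []) (k : Int) 0))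
          (w.getD k [])) := by
    intro w k hk
    rw [List.foldl_map]
    exact pv_foldl_setCell k _ _ _ w hk
  have := pv_foldl_set_range ([] : List Int)
    (fun (k : Nat) (v : List Int) => (List.range n).foldl (fun (row : List Int) (j : Nat) =>
        PySem.List.pySetD row ((n : Int) - ((n : Int) - 1 - (j : Int)) - 1)
          (PySem.List.pyGetD (PySem.List.pyGetD T ((n : Int) - 1 - (j : Int)) []) (k : Int) 0)) v)
    _ hstep m ((List.range m).map (fun _ => List.replicate (n : Int).toNat (0:Int))) (by simp)
  rw [this]
  rw [List.drop_eq_nil_of_le (by simp), List.append_nil]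
  apply List.map_congr_left
  intro c hc
  have hc' : c < m := by simpa using hc
  have hget : ((List.range m).map (fun _ => List.replicate (n : Int).toNat (0:Int))).getD c []
      = List.replicate (n : Int).toNat (0:Int) := by
    rw [List.getD_eq_getElem _ _ (by simpa using hc')]
    simp
  rw [hget]
  have := pv_row_fill n
    (fun (j : Nat) => PySem.List.pyGetD (PySem.List.pyGetD T ((n : Int) - 1 - (j : Int)) []) (c : Int) 0)
    (List.replicate (n : Int).toNat (0:Int)) (by simp)
  rw [← this]
  apply PySem.List.foldl_congr_mem
  intro acc j _
  rw [pv_idx_cw]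

-- A's CCW grid construction equals the range-map characterisation
theorem pv_ccw_grid (T : List (List Int)) (m : Nat) :
    (PySem.List.pyRange ((m : Int) - 1) (-1) (-1)).foldl (fun g c =>
        ((List.range T.length).map (fun (k : Nat) => (k : Int))).foldl (fun g r =>
          pvSetCell g ((m : Int) - c - 1) r
            (PySem.List.pyGetD (PySem.List.pyGetD T r []) c 0)) g)
      (((List.range m).map (fun (k : Nat) => (k : Int))).map (fun _ => List.replicate (T.length : Int).toNat (0:Int)))
    = (List.range m).map (fun (k : Nat) => (List.range T.length).map
        (fun (r : Nat) => PySem.List.pyGetD (PySem.List.pyGetD T (r : Int) []) ((m : Int) - 1 - (k : Int)) 0)) := by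
  set n := T.length with hn
  have hrange : PySem.List.pyRange ((m : Int) - 1) (-1) (-1)
      = (List.range m).map (fun (k : Nat) => (m : Int) - 1 - (k : Int)) := by
    have hmm : ((m : Int) - 1 - (-1)).toNat = m := by omega
    rw [PySem.List.pyRange_neg_one, hmm]
  rw [hrange, List.foldl_map, List.map_map]
  try simp only [Function.comp_def]
  have hstep : ∀ (w : List (List Int)) (k : Nat), k < w.length →
      (((List.range n).map (fun (r : Nat) => (r : Int))).foldl (fun g r =>
          pvSetCell g ((m : Int) - ((m : Int) - 1 - (k : Int)) - 1) r
            (PySem.List.pyGetD (PySem.List.pyGetD T r []) ((m : Int) - 1 - (k : Int)) 0)) w)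
      = w.set k ((List.range n).foldl (fun (row : List Int) (r : Nat) =>
          PySem.List.pySetD row ((r : Nat) : Int)
            (PySem.List.pyGetD (PySem.List.pyGetD T ((r : Nat) : Int) []) ((m : Int) - 1 - (k : Int)) 0))
          (w.getD k [])) := by
    intro w k hk
    rw [List.foldl_map]
    have hidx : ∀ (g : List (List Int)) (r : Nat),
        pvSetCell g ((m : Int) - ((m : Int) - 1 - (k : Int)) - 1) ((r : Nat) : Int)
          (PySem.List.pyGetD (PySem.List.pyGetD T ((r : Nat) : Int) []) ((m : Int) - 1 - (k : Int)) 0)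
        = pvSetCell g ((k : Nat) : Int) ((r : Nat) : Int)
          (PySem.List.pyGetD (PySem.List.pyGetD T ((r : Nat) : Int) []) ((m : Int) - 1 - (k : Int)) 0) := by
      intro g r
      rw [pv_idx_ccw]
    simp only [hidx]
    exact pv_foldl_setCell k _ _ _ w hk
  have := pv_foldl_set_range ([] : List Int)
    (fun (k : Nat) (v : List Int) => (List.range n).foldl (fun (row : List Int) (r : Nat) =>
        PySem.List.pySetD row ((r : Nat) : Int)
          (PySem.List.pyGetD (PySem.List.pyGetD T ((r : Nat) : Int) []) ((m : Int) - 1 - (k : Int)) 0)) v)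
    _ hstep m ((List.range m).map (fun _ => List.replicate (n : Int).toNat (0:Int))) (by simp)
  rw [this]
  rw [List.drop_eq_nil_of_le (by simp), List.append_nil]
  apply List.map_congr_left
  intro k hk
  have hk' : k < m := by simpa using hk
  have hget : ((List.range m).map (fun _ => List.replicate (n : Int).toNat (0:Int))).getD k []
      = List.replicate (n : Int).toNat (0:Int) := by
    rw [List.getD_eq_getElem _ _ (by simpa using hk')]
    simp
  rw [hget]
  exact pv_row_fill n _ (List.replicate (n : Int).toNat (0:Int)) (by simp)

-- branch equalities under Pre_
theorem pv_cw_eq (T : List (List Int)) (hne : T ≠ [])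
    (hlen : ∀ row ∈ T, (T.headD []).length ≤ row.length) :
    ((List.range (PySem.List.pyGetD T 0 []).length).map (fun (k : Nat) => (k : Int))).foldl (fun g c =>
        (PySem.List.pyRange ((T.length : Int) - 1) (-1) (-1)).foldl (fun g r =>
          pvSetCell g c ((T.length : Int) - r - 1)
            (PySem.List.pyGetD (PySem.List.pyGetD T r []) c 0)) g)
      (((List.range (PySem.List.pyGetD T 0 []).length).map (fun (k : Nat) => (k : Int))).map
        (fun _ => List.replicate (T.length : Int).toNat (0:Int)))
    = pvZipStar T.reverse := by
  have hhead : PySem.List.pyGetD T 0 [] = T.headD [] := by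
    rw [PySem.List.pyGetD_zero, pv_headD_eq_getD]
  set m := (PySem.List.pyGetD T 0 []).length with hm
  rw [pv_cw_grid T m]
  rw [pv_zipStar_eq m T.reverse (by simpa using hne)
    (by intro l hl; rw [hm, hhead]; exact hlen l (List.mem_reverse.mp hl))
    (by
      refine ⟨T.headD [], ?_, by rw [hm, hhead]⟩
      rw [List.mem_reverse]
      cases T with
      | nil => simp at hne
      | cons h t => simp)]
  apply List.map_congr_left
  intro c _
  exact (pv_rev_col T c).symm

theorem pv_ccw_eq (T : List (List Int)) (hne : T ≠ [])
    (hlen : ∀ row ∈ T, (T.headD []).length ≤ row.length) :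
    (PySem.List.pyRange (((PySem.List.pyGetD T 0 []).length : Int) - 1) (-1) (-1)).foldl (fun g c =>
        ((List.range T.length).map (fun (k : Nat) => (k : Int))).foldl (fun g r =>
          pvSetCell g (((PySem.List.pyGetD T 0 []).length : Int) - c - 1) r
            (PySem.List.pyGetD (PySem.List.pyGetD T r []) c 0)) g)
      (((List.range (PySem.List.pyGetD T 0 []).length).map (fun (k : Nat) => (k : Int))).map
        (fun _ => List.replicate (T.length : Int).toNat (0:Int)))
    = (pvZipStar T).reverse := by
  have hhead : PySem.List.pyGetD T 0 [] = T.headD [] := by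
    rw [PySem.List.pyGetD_zero, pv_headD_eq_getD]
  set m := (PySem.List.pyGetD T 0 []).length with hm
  rw [pv_ccw_grid T m]
  rw [pv_zipStar_eq m T hne (by intro l hl; rw [hm, hhead]; exact hlen l hl)
    (by
      refine ⟨T.headD [], ?_, by rw [hm, hhead]⟩
      cases T with
      | nil => simp at hne
      | cons h t => simp)]
  rw [pv_reverse_map_range]
  apply List.map_congr_left
  intro k hk
  have hk' : k < m := by simpa using hk
  have hcast : ((m - 1 - k : Nat) : Int) = (m : Int) - 1 - (k : Int) := by omega
  rw [← hcast, ← pv_map_eq_range T ((m - 1 - k : Nat) : Int)]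
  apply List.map_congr_left
  intro t _
  rw [PySem.List.pyGetD_natCast]

theorem pv_flip_eq (T : List (List Int)) :
    ((List.range T.length).map (fun (k : Nat) => (k : Int))).map
      (fun _ => List.replicate ((PySem.List.pyGetD T 0 []).length : Int).toNat (0:Int))
    = List.replicate T.length (List.replicate (PySem.List.pyGetD T 0 []).length (0:Int)) := by
  rw [List.map_map]
  have : (((PySem.List.pyGetD T 0 []).length : Int)).toNat = (PySem.List.pyGetD T 0 []).length := by omega
  rw [this]
  exact pv_map_const_range T.length _

-- ===== VERDICT (by name: the statement is the Claim_ definition above) =====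
theorem grid_transforms_spec : Claim_equal_grid_transforms := by
  intro T inst _ hpre
  obtain ⟨hne, hrag⟩ := hpre
  unfold Spec_grid_transforms grid_transforms grid_transforms_alt
  simp only [PySem.List.len_eq]
  rw [PySem.List.foldl_pyRange_zero_pyGetD' inst "" (fun output ins =>
    if ins = "CW" then
      output ++ [((PySem.List.pyRange 0 ((PySem.List.pyGetD T 0 []).length : Int) 1).foldl (fun g c =>
        (PySem.List.pyRange ((T.length : Int) - 1) (-1) (-1)).foldl (fun g r =>
          pvSetCell g c ((T.length : Int) - r - 1)
            (PySem.List.pyGetD (PySem.List.pyGetD T r []) c 0)) g)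
        ((PySem.List.pyRange 0 ((PySem.List.pyGetD T 0 []).length : Int) 1).map
          (fun _ => List.replicate (T.length : Int).toNat (0:Int))))]
    else if ins = "CCW" then
      output ++ [((PySem.List.pyRange (((PySem.List.pyGetD T 0 []).length : Int) - 1) (-1) (-1)).foldl (fun g c =>
        (PySem.List.pyRange 0 (T.length : Int) 1).foldl (fun g r =>
          pvSetCell g (((PySem.List.pyGetD T 0 []).length : Int) - c - 1) r
            (PySem.List.pyGetD (PySem.List.pyGetD T r []) c 0)) g)
        ((PySem.List.pyRange 0 ((PySem.List.pyGetD T 0 []).length : Int) 1).map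
          (fun _ => List.replicate (T.length : Int).toNat (0:Int))))]
    else if ins = "FLIP_V" then
      output ++ [(PySem.List.pyRange 0 (T.length : Int) 1).map
        (fun _ => List.replicate ((PySem.List.pyGetD T 0 []).length : Int).toNat (0:Int))]
    else output) []]
  apply PySem.List.foldl_congr_mem
  intro acc op hop
  by_cases h1 : op = "CW"
  · subst h1
    rw [PySem.List.pyRange_zero_nat, pv_cw_eq T hne (hrag (Or.inl hop))]
    simp
  · rw [if_neg h1, if_neg h1]
    by_cases h2 : op = "CCW"
    · subst h2
      rw [PySem.List.pyRange_zero_nat, PySem.List.pyRange_zero_nat,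
        pv_ccw_eq T hne (hrag (Or.inr hop))]
      simp
    · rw [if_neg h2, if_neg h2]
      by_cases h3 : op = "FLIP_V"
      · subst h3
        rw [PySem.List.pyRange_zero_nat, pv_flip_eq T]
      · rw [if_neg h3, if_neg h3]
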